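-- pv_equiv track=rewrite | github.com/locharp/code-snippets | Coding Ninjas/Coding World Cup 2023/Moderate/Day 27: PAK vs BAN: Bait and switch.py | baitAndSwitch
-- ===== SOURCE A (Python) =====
-- def baitAndSwitch( n: int, a: list, k: int, m: int ) -> int:
--
--     ans = i = 0
--     a.sort()
--     n -= 1
--
--     while i <= n and k > 0:
--         p = abs( m - a[i] )
--         q = abs( m - a[n] )
--
--         if p > q:
--             ans += p
--             i += 1
--         else:
--             ans += q
--             n -= 1
--
--         k -= 1
--
--     return ans
-- ===== SOURCE B (Python) =====
-- def baitAndSwitch(n, a, k, m):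
--     # Note: A sorts `a` in place; B leaves `a` untouched (return value is the same).
--     window = sorted(a)[:max(n, 0)]
--     diffs = sorted((abs(m - x) for x in window), reverse=True)
--     return sum(diffs[:max(k, 0)])
-- ===== Notes on version B (the rewrite author's own statement) =====
-- stated objective: simpler
-- what changed: A runs a two-pointer greedy loop over the sorted array picking the larger endpoint difference k times; B simply sorts the absolute differences of the first n sorted elements in descending order and sums the first k -- no loop state, no index bookkeeping.
import Mathlib
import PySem

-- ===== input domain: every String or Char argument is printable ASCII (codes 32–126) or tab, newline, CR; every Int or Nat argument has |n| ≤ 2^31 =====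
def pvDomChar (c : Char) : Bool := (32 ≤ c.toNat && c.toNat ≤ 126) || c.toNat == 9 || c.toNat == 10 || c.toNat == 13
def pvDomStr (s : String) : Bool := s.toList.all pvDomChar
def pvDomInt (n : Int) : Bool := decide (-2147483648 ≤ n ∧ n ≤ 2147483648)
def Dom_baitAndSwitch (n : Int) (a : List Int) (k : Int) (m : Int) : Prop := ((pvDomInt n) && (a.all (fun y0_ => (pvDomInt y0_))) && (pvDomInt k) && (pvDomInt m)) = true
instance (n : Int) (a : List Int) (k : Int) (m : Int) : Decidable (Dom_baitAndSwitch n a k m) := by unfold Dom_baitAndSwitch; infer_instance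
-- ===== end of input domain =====

-- B replaces A's two-pointer greedy over the sorted array by "sort the absolute
-- differences descending and sum the first k" — simpler, same O(n log n) cost.
-- A sorts its list argument IN PLACE; B does not mutate it: the equivalence proved
-- here is about the RETURN value only.

-- ===== PORT A =====
-- the while loop: fuel = k.toNat (k > 0 and k -= 1), state (ans, i, n)
def pvLoopA (s : List Int) (m : Int) : Nat → Int → Int → Int → Int
  | 0, ans, _, _ => ans
  | fuel+1, ans, i, nn =>
    if i ≤ nn then
      let p := |m - PySem.List.pyGetD s i 0|
      let q := |m - PySem.List.pyGetD s nn 0|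
      if q < p then pvLoopA s m fuel (ans + p) (i+1) nn
      else pvLoopA s m fuel (ans + q) i (nn-1)
    else ans

def baitAndSwitch (n : Int) (a : List Int) (k : Int) (m : Int) : Int :=
  pvLoopA (PySem.List.sorted a (fun x => x) false) m k.toNat 0 0 (n - 1)

-- ===== PORT B =====
def baitAndSwitch_alt (n : Int) (a : List Int) (k : Int) (m : Int) : Int :=
  let window := PySem.List.slice (PySem.List.sorted a (fun x => x) false) none (some (max n 0))
  let diffs := PySem.List.sorted (window.map (fun x => |m - x|)) (fun x => x) true
  (PySem.List.slice diffs none (some (max k 0))).sum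

-- ===== PRECONDITION & SPEC =====
-- Pre_ excludes exactly the inputs where A raises IndexError (k > 0 and n > len(a)).
def Pre_baitAndSwitch (n : Int) (a : List Int) (k : Int) (m : Int) : Prop :=
  k ≤ 0 ∨ n ≤ (a.length : Int)
instance (n : Int) (a : List Int) (k : Int) (m : Int) : Decidable (Pre_baitAndSwitch n a k m) := by unfold Pre_baitAndSwitch; infer_instance
def pvWitness_baitAndSwitch : Int × List Int × Int × Int := (3, [1, 5, 2], 2, 4)

def Spec_baitAndSwitch (n : Int) (a : List Int) (k : Int) (m : Int) (out : Int) : Prop := out = baitAndSwitch_alt n a k m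
instance (n : Int) (a : List Int) (k : Int) (m : Int) (out : Int) : Decidable (Spec_baitAndSwitch n a k m out) := by unfold Spec_baitAndSwitch; infer_instance

-- ===== CLAIM (what is proved, stated in full; the proofs are below) =====
def Claim_equal_baitAndSwitch : Prop := ∀ (n : Int) (a : List Int) (k : Int) (m : Int), Dom_baitAndSwitch n a k m → Pre_baitAndSwitch n a k m → Spec_baitAndSwitch n a k m (baitAndSwitch n a k m)

-- ===== LEMMAS AND PROOFS =====

-- A's loop rephrased on the current window (a contiguous slice of the sorted list)
def pvLoopW (m : Int) : Nat → Int → List Int → Int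
  | 0, ans, _ => ans
  | _+1, ans, [] => ans
  | fuel+1, ans, x :: xs =>
    let p := |m - x|
    let q := |m - (x :: xs).getLast (by simp)|
    if q < p then pvLoopW m fuel (ans + p) xs
    else pvLoopW m fuel (ans + q) (x :: xs).dropLast

lemma pvDescUnique (xs ys : List Int) (hp : ys.Perm xs)
    (hs : ys.Pairwise (fun a b => b ≤ a)) :
    PySem.List.sorted xs (fun x => x) true = ys := by
  have h1 : (PySem.List.sorted xs (fun x => x) true).Perm ys :=
    (PySem.List.sorted_perm xs _ true).trans hp.symm
  have h2 := PySem.List.sorted_pairwise_rev (xs := xs) (key := fun x => x)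
  exact h1.eq_of_pairwise (fun a b _ _ hab hba => le_antisymm hba hab) h2 hs

lemma pvDescCons (xs l : List Int) (c : Int) (hperm : xs.Perm (c :: l))
    (hmax : ∀ y ∈ xs, y ≤ c) :
    PySem.List.sorted xs (fun x => x) true = c :: PySem.List.sorted l (fun x => x) true := by
  apply pvDescUnique
  · exact ((PySem.List.sorted_perm l _ true).cons c).trans hperm.symm
  · refine List.pairwise_cons.mpr ⟨?_, PySem.List.sorted_pairwise_rev l (fun x => x)⟩
    intro y hy
    have : y ∈ l := (PySem.List.mem_sorted l _ true y).1 hy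
    exact hmax y (hperm.symm.mem_iff.1 (List.mem_cons_of_mem _ this))

lemma pvLeGetLast {w : List Int} (hw : w.Pairwise (· ≤ ·)) (y : Int) (hy : y ∈ w)
    (h : w ≠ []) : y ≤ w.getLast h := by
  induction w with
  | nil => simp at hy
  | cons a t ih =>
    rcases List.mem_cons.1 hy with rfl | hy'
    · cases t with
      | nil => simp at hy ⊢
      | cons b t' =>
        rw [List.getLast_cons (by simp)]
        exact le_trans ((List.pairwise_cons.1 hw).1 _ (List.getLast_mem _)) le_rfl
    · have ht : t ≠ [] := List.ne_nil_of_mem hy'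
      rw [List.getLast_cons ht]
      exact ih (List.pairwise_cons.1 hw).2 hy' ht

lemma pvAbsBound (m x y z : Int) (h1 : x ≤ y) (h2 : y ≤ z) :
    |m - y| ≤ max |m - x| |m - z| := by
  rcases le_total y m with h | h
  · refine le_max_of_le_left ?_
    have h1' : |m - y| = m - y := abs_of_nonneg (by omega)
    have h2' : m - x ≤ |m - x| := le_abs_self _
    omega
  · refine le_max_of_le_right ?_
    have h1' : |m - y| = -(m - y) := abs_of_nonpos (by omega)
    have h2' : -(m - z) ≤ |m - z| := neg_le_abs _
    omega

-- main invariant: on a sorted window, A's greedy sums the `fuel` largest differences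
lemma pvLoopW_eq (m : Int) (fuel : Nat) : ∀ (w : List Int) (ans : Int),
    w.Pairwise (· ≤ ·) →
    pvLoopW m fuel ans w
      = ans + ((PySem.List.sorted (w.map (fun x => |m - x|)) (fun x => x) true).take fuel).sum := by
  induction fuel with
  | zero => intro w ans _; simp [pvLoopW]
  | succ fuel ih =>
    intro w ans hw
    match w with
    | [] =>
      rw [show PySem.List.sorted (([]:List Int).map (fun x => |m - x|)) (fun x => x) true = [] from rfl]
      simp [pvLoopW]
    | x :: xs =>
      have hne : (x :: xs) ≠ [] := by simp
      set z := (x :: xs).getLast hne with hz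
      have hmax : ∀ d ∈ (x :: xs).map (fun t => |m - t|), d ≤ max |m - x| |m - z| := by
        intro d hd
        rcases List.mem_map.1 hd with ⟨y, hy, rfl⟩
        have h1 : x ≤ y := by
          rcases List.mem_cons.1 hy with rfl | hy'
          · exact le_rfl
          · exact (List.pairwise_cons.1 hw).1 _ hy'
        exact pvAbsBound m x y z h1 (pvLeGetLast hw y hy hne)
      rw [pvLoopW]
      split
      · -- q < p : take p = |m - x|, window tail
        next hlt =>
        have hc : max |m - x| |m - z| = |m - x| := max_eq_left (le_of_lt hlt)
        have hsort := pvDescCons ((x :: xs).map (fun t => |m - t|)) (xs.map (fun t => |m - t|))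
            (|m - x|) (by simp) (by rw [← hc]; exact hmax)
        rw [ih xs (ans + |m - x|) (List.pairwise_cons.1 hw).2, hsort]
        rw [List.take_succ_cons, List.sum_cons]
        ring
      · -- p ≤ q : take q = |m - z|, drop last
        next hge =>
        have hc : max |m - x| |m - z| = |m - z| := max_eq_right (le_of_not_gt hge)
        have hsplit : (x :: xs) = (x :: xs).dropLast ++ [z] := (List.dropLast_append_getLast hne).symm
        have hperm : ((x :: xs).map (fun t => |m - t|)).Perm
            (|m - z| :: ((x :: xs).dropLast.map (fun t => |m - t|))) := by
          conv_lhs => rw [hsplit]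
          rw [List.map_append]
          exact List.perm_append_comm
        have hsort := pvDescCons ((x :: xs).map (fun t => |m - t|))
            ((x :: xs).dropLast.map (fun t => |m - t|)) (|m - z|) hperm (by rw [← hc]; exact hmax)
        rw [ih ((x :: xs).dropLast) (ans + |m - z|) (hw.sublist (List.dropLast_sublist (x :: xs))), hsort]
        rw [List.take_succ_cons, List.sum_cons]
        ring

-- bridge: A's index loop is the window loop
lemma pvLoopA_eq_loopW (s : List Int) (m : Int) (fuel : Nat) :
    ∀ (i nn ans : Int), 0 ≤ i → i ≤ nn + 1 → nn < (s.length : Int) →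
    pvLoopA s m fuel ans i nn
      = pvLoopW m fuel ans ((s.drop i.toNat).take (nn + 1 - i).toNat) := by
  induction fuel with
  | zero => intro i nn ans _ _ _; rfl
  | succ fuel ih =>
    intro i nn ans h0 h1 h2
    rw [pvLoopA]
    by_cases hin : i ≤ nn
    · rw [if_pos hin]
      have ha : i < (s.length : Int) := by omega
      have hb : nn.toNat < s.length := by omega
      have hbi : i.toNat < s.length := by omega
      -- window decompositions
      have hrep1 : (s.drop i.toNat).take (nn + 1 - i).toNat
          = s[i.toNat] :: ((s.drop (i.toNat + 1)).take (nn - i).toNat) := by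
        rw [List.drop_eq_getElem_cons hbi]
        have : (nn + 1 - i).toNat = (nn - i).toNat + 1 := by omega
        rw [this, List.take_succ_cons]
      have hrep2 : (s.drop i.toNat).take (nn + 1 - i).toNat
          = ((s.drop i.toNat).take (nn - i).toNat) ++ [s[nn.toNat]] := by
        have hlt : (nn - i).toNat < (s.drop i.toNat).length := by
          rw [List.length_drop]; omega
        have : (nn + 1 - i).toNat = (nn - i).toNat + 1 := by omega
        rw [this, List.take_add_one, List.getElem?_eq_getElem hlt]
        have : (s.drop i.toNat)[(nn - i).toNat] = s[nn.toNat] := by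
          rw [List.getElem_drop]
          congr 1
          omega
        simp [this]
      rw [hrep1, pvLoopW]
      have hglast : (s[i.toNat] :: ((s.drop (i.toNat + 1)).take (nn - i).toNat)).getLast (by simp)
          = s[nn.toNat] := by
        have h' := hrep1.symm.trans hrep2
        have := List.getLast?_concat (l := (s.drop i.toNat).take (nn - i).toNat) (a := s[nn.toNat])
        rw [← h'] at this
        rw [List.getLast?_eq_some_getLast (h := by simp)] at this
        exact Option.some_injective _ this
      rw [hglast]
      have hpi : PySem.List.pyGetD s i 0 = s[i.toNat] := PySem.List.pyGetD_eq_getElem s 0 h0 ha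
      have hpn : PySem.List.pyGetD s nn 0 = s[nn.toNat] :=
        PySem.List.pyGetD_eq_getElem s 0 (by omega) (by omega)
      rw [hpi, hpn]
      by_cases hq : |m - s[nn.toNat]| < |m - s[i.toNat]|
      · rw [if_pos hq, if_pos hq, ih (i+1) nn (ans + |m - s[i.toNat]|) (by omega) (by omega) h2,
           show (i+1).toNat = i.toNat + 1 from by omega,
           show (nn + 1 - (i+1)).toNat = (nn - i).toNat from by omega]
      · rw [if_neg hq, if_neg hq, ih i (nn-1) (ans + |m - s[nn.toNat]|) h0 (by omega) (by omega)]
        have hdl : (s[i.toNat] :: ((s.drop (i.toNat + 1)).take (nn - i).toNat)).dropLast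
            = (s.drop i.toNat).take (nn - 1 + 1 - i).toNat := by
          rw [hrep1.symm.trans hrep2, List.dropLast_concat]
          congr 1
          omega
        rw [hdl]
    · rw [if_neg hin]
      have : (nn + 1 - i).toNat = 0 := by omega
      rw [this]
      simp [pvLoopW]

-- ===== VERDICT (by name: the statement is the Claim_ definition above) =====
theorem baitAndSwitch_spec : Claim_equal_baitAndSwitch := by
  intro n a k m _ hpre
  unfold Pre_baitAndSwitch at hpre
  unfold Spec_baitAndSwitch
  simp only [baitAndSwitch, baitAndSwitch_alt]
  rw [PySem.List.slice_to _ (le_max_right n 0), PySem.List.slice_to _ (le_max_right k 0)]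
  set s := PySem.List.sorted a (fun x => x) false with hsdef
  have hlen : s.length = a.length := by
    rw [hsdef]; exact (PySem.List.sorted_perm a _ false).length_eq
  have hs : s.Pairwise (· ≤ ·) := PySem.List.sorted_pairwise a (fun x => x)
  by_cases hk : k ≤ 0
  · -- loop never runs; B sums an empty prefix
    rw [show (max k 0).toNat = 0 from by omega, show k.toNat = 0 from by omega]
    simp [pvLoopA]
  · have hkpos : 0 < k := by omega
    have hmk : (max k 0).toNat = k.toNat := by omega
    by_cases hn : n ≤ 0
    · -- empty window
      obtain ⟨t, ht⟩ : ∃ t, k.toNat = t + 1 := ⟨k.toNat - 1, by omega⟩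
      rw [ht, pvLoopA, if_neg (by omega), show (max n 0).toNat = 0 from by omega, List.take_zero]
      rw [show PySem.List.sorted (([] : List Int).map (fun x => |m - x|)) (fun x => x) true = [] from rfl]
      simp
    · rw [pvLoopA_eq_loopW s m k.toNat 0 (n-1) 0 (by omega) (by omega) (by omega)]
      rw [show ((0:Int).toNat) = 0 from rfl, List.drop_zero,
          show (n - 1 + 1 - 0).toNat = n.toNat from by omega]
      rw [pvLoopW_eq m k.toNat (s.take n.toNat) 0 (hs.sublist (List.take_sublist _ _))]
      rw [hmk, show (max n 0).toNat = n.toNat from by omega]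
      omega
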